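-- pv_equiv track=rewrite | github.com/KickingAnimal/SDAL-Builder | src/sdal_builder/szip_compressor.py | get_length_code
-- ===== SOURCE A (Python) =====
-- class LZ77Constants:
--     """Constants for the LZ77 matching phase."""
--     WINDOW_SIZE = 32768  # 2^15 bytes lookback buffer size
--     MAX_MATCH_LENGTH = 258
--     MIN_MATCH_LENGTH = 3
--
-- FIRST_LENGTH_CODE = 257
--
-- MAX_LENGTH_CODE = 285
--
-- LENGTH_MAP = [
--     (3, 0), (4, 0), (5, 1), (7, 1), (9, 2), (13, 2), (17, 3), (25, 3),
--     (33, 4), (49, 4), (65, 5), (97, 5), (129, 6), (193, 6), (257, 7), (385, 7),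
--     (513, 8), (769, 8), (1025, 9), (1537, 9), (2049, 10), (3073, 10),
--     (4097, 11), (6145, 11), (8193, 12), (12289, 12), (16385, 13), (24577, 13)
--     # Length 258 is handled as a special case (MAX_LENGTH_CODE)
-- ]
--
-- def get_length_code(length: int) -> tuple[int, int]:
--     """
--     Converts actual length (L) into (Huffman Base Code, Extra Bits).
--     """
--     if length == LZ77Constants.MAX_MATCH_LENGTH:
--         # Length 258 is always encoded by MAX_LENGTH_CODE (285) with 0 extra bits
--         return (MAX_LENGTH_CODE, 0)
--
--     # Iterate through the static length codes
--     code = FIRST_LENGTH_CODE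
--     for base_len, bits in LENGTH_MAP:
--         # Check if the length falls into the current range
--         if length < base_len + (1 << bits):
--             # Calculate the actual value for the extra bits
--             extra_value = length - base_len
--             return (code, bits) # Return the Huffman Code and number of Extra Bits
--         code += 1
--
--     raise ValueError(f"Length {length} is out of range.")
-- ===== SOURCE B (Python) =====
-- FIRST_LENGTH_CODE = 257
-- MAX_LENGTH_CODE = 285
--
-- LENGTH_MAP = [
--     (3, 0), (4, 0), (5, 1), (7, 1), (9, 2), (13, 2), (17, 3), (25, 3),
--     (33, 4), (49, 4), (65, 5), (97, 5), (129, 6), (193, 6), (257, 7), (385, 7),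
--     (513, 8), (769, 8), (1025, 9), (1537, 9), (2049, 10), (3073, 10),
--     (4097, 11), (6145, 11), (8193, 12), (12289, 12), (16385, 13), (24577, 13)
-- ]
--
-- # exclusive upper bound of each code's range, precomputed once
-- _THRESHOLDS = [base + (1 << bits) for base, bits in LENGTH_MAP]
-- _BITS = [bits for _, bits in LENGTH_MAP]
--
--
-- def get_length_code(length: int) -> tuple[int, int]:
--     """
--     Converts actual length (L) into (Huffman Base Code, Extra Bits).
--     """
--     if length == 258:
--         return (MAX_LENGTH_CODE, 0)
--     # binary search: first threshold strictly greater than length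
--     lo, hi = 0, len(_THRESHOLDS)
--     while lo < hi:
--         mid = (lo + hi) // 2
--         if length < _THRESHOLDS[mid]:
--             hi = mid
--         else:
--             lo = mid + 1
--     if lo == len(_THRESHOLDS):
--         raise ValueError(f"Length {length} is out of range.")
--     return (FIRST_LENGTH_CODE + lo, _BITS[lo])
-- ===== Notes on version B (the rewrite author's own statement) =====
-- stated objective: alternative
-- what changed: Replaces the linear scan over LENGTH_MAP with a binary search over a precomputed list of exclusive upper-bound thresholds.
import Mathlib
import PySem

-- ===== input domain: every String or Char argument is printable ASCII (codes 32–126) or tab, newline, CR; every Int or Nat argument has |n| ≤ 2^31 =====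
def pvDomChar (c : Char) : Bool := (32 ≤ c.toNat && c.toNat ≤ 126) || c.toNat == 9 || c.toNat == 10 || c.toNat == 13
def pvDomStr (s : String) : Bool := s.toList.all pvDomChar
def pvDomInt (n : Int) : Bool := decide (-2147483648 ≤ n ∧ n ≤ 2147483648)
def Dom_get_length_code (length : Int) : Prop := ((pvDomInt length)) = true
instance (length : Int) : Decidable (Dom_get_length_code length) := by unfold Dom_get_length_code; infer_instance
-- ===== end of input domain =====

set_option maxRecDepth 4000


-- B replaces A's linear scan of LENGTH_MAP with a binary search over precomputed thresholds (alternative structure, same exact values).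

-- ===== PORT A =====
def lengthMap : List (Int × Int) :=
  [(3, 0), (4, 0), (5, 1), (7, 1), (9, 2), (13, 2), (17, 3), (25, 3),
   (33, 4), (49, 4), (65, 5), (97, 5), (129, 6), (193, 6), (257, 7), (385, 7),
   (513, 8), (769, 8), (1025, 9), (1537, 9), (2049, 10), (3073, 10),
   (4097, 11), (6145, 11), (8193, 12), (12289, 12), (16385, 13), (24577, 13)]

-- A's for-loop with early return; none = the final ValueError (excluded by Pre_)
def glcLoop (length : Int) (code : Int) : List (Int × Int) → Option (Int × Int)
  | [] => none
  | (base, bits) :: rest =>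
      if length < base + 2 ^ bits.toNat then some (code, bits)
      else glcLoop length (code + 1) rest

def get_length_code (length : Int) : Int × Int :=
  if length = 258 then (285, 0)
  else
    match glcLoop length 257 lengthMap with
    | some r => r
    | none => (0, 0)  -- A raises ValueError here; outside Pre_

-- ===== PORT B =====
-- _THRESHOLDS = [base + (1 << bits) for base, bits in LENGTH_MAP], precomputed
def glcThresholds : List Int :=
  [4, 5, 7, 9, 13, 17, 25, 33, 49, 65, 97, 129, 193, 257, 385, 513, 769, 1025,
   1537, 2049, 3073, 4097, 6145, 8193, 12289, 16385, 24577, 32769]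

def glcBits : List Int :=
  [0, 0, 1, 1, 2, 2, 3, 3, 4, 4, 5, 5, 6, 6, 7, 7, 8, 8, 9, 9, 10, 10, 11, 11, 12, 12, 13, 13]

-- Source B's hand-written while-loop binary search (bisect-right)
def glcBisect (length : Int) (lo hi : Nat) : Nat :=
  if lo < hi then
    if length < glcThresholds.getD ((lo + hi) / 2) 0 then glcBisect length lo ((lo + hi) / 2)
    else glcBisect length ((lo + hi) / 2 + 1) hi
  else lo
termination_by hi - lo
decreasing_by all_goals omega

def get_length_code_alt (length : Int) : Int × Int :=
  if length = 258 then (285, 0)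
  else
    let lo := glcBisect length 0 28
    if lo = 28 then (0, 0)  -- B raises ValueError here; outside Pre_
    else ((257 : Int) + lo, glcBits.getD lo 0)

-- ===== PRECONDITION & SPEC =====
-- Pre_ excludes exactly the inputs (length > 32768) on which A (and B) raise ValueError.
def Pre_get_length_code (length : Int) : Prop := length ≤ 32768
instance (length : Int) : Decidable (Pre_get_length_code length) := by unfold Pre_get_length_code; infer_instance
def pvWitness_get_length_code : Int := 100

def Spec_get_length_code (length : Int) (out : Int × Int) : Prop := out = get_length_code_alt length
instance (length : Int) (out : Int × Int) : Decidable (Spec_get_length_code length out) := by unfold Spec_get_length_code; infer_instance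

-- ===== CLAIM (what is proved, stated in full; the proofs are below) =====
def Claim_equal_get_length_code : Prop := ∀ (length : Int), Dom_get_length_code length → Pre_get_length_code length → Spec_get_length_code length (get_length_code length)

-- ===== LEMMAS AND PROOFS =====

-- the thresholds are monotone (finite check)
theorem glcT_mono : ∀ j, j < 28 → ∀ i, i ≤ j → glcThresholds.getD i 0 ≤ glcThresholds.getD j 0 := by
  decide

-- entry k of LENGTH_MAP matches threshold k and bits k (finite check)
theorem glcMapFacts : ∀ k, k < 28 →
    (lengthMap.getD k (0, 0)).1 + 2 ^ ((lengthMap.getD k (0, 0)).2).toNat = glcThresholds.getD k 0 ∧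
    (lengthMap.getD k (0, 0)).2 = glcBits.getD k 0 := by
  decide

-- A's loop returns the first entry whose range contains `length`, with the running code counter
theorem glcLoop_eq (l : List (Int × Int)) : ∀ (code length : Int),
    glcLoop length code l =
      match l.findIdx? (fun q => decide (length < q.1 + 2 ^ q.2.toNat)) with
      | some k => some (code + k, (l.getD k (0, 0)).2)
      | none => none := by
  induction l with
  | nil => intro code length; rfl
  | cons a rest ih =>
    intro code length
    obtain ⟨base, bits⟩ := a
    rw [List.findIdx?_cons]
    by_cases h : length < base + 2 ^ bits.toNat
    · simp [glcLoop, h]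
    · have h' : (decide (length < base + 2 ^ bits.toNat)) = false := by simpa using h
      simp only [glcLoop, if_neg h, h']
      rw [ih (code + 1) length]
      cases hf : rest.findIdx? (fun q => decide (length < q.1 + 2 ^ q.2.toNat)) with
      | none => simp
      | some k =>
        simp
        omega

-- B's binary search computes the first index whose threshold exceeds `length`
theorem glcBisect_first (length : Int) : ∀ (n lo hi : Nat), hi - lo ≤ n → hi ≤ 28 → lo ≤ hi →
    (∀ i, i < lo → glcThresholds.getD i 0 ≤ length) →
    (∀ i, hi ≤ i → i < 28 → length < glcThresholds.getD i 0) →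
    lo ≤ glcBisect length lo hi ∧ glcBisect length lo hi ≤ hi ∧
    (∀ i, i < glcBisect length lo hi → glcThresholds.getD i 0 ≤ length) ∧
    (glcBisect length lo hi < 28 → length < glcThresholds.getD (glcBisect length lo hi) 0) := by
  intro n
  induction n with
  | zero =>
    intro lo hi hn h28 hle hbelow habove
    have : lo = hi := by omega
    subst this
    rw [glcBisect, if_neg (by omega)]
    exact ⟨le_refl _, le_refl _, hbelow, fun h => habove lo (le_refl _) h⟩
  | succ n ih =>
    intro lo hi hn h28 hle hbelow habove
    by_cases hlt : lo < hi
    · rw [glcBisect, if_pos hlt]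
      by_cases hmid : length < glcThresholds.getD ((lo + hi) / 2) 0
      · rw [if_pos hmid]
        have h := ih lo ((lo + hi) / 2) (by omega) (by omega) (by omega) hbelow
          (fun i hi1 hi2 => lt_of_lt_of_le hmid (glcT_mono i hi2 _ hi1))
        exact ⟨h.1, le_trans h.2.1 (by omega), h.2.2⟩
      · rw [if_neg hmid]
        have hmid' : glcThresholds.getD ((lo + hi) / 2) 0 ≤ length := le_of_not_gt hmid
        have h := ih ((lo + hi) / 2 + 1) hi (by omega) h28 (by omega)
          (fun i hi1 => le_trans (glcT_mono ((lo + hi) / 2) (by omega) i (by omega)) hmid')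
          habove
        exact ⟨le_trans (by omega) h.1, h.2.1, h.2.2⟩
    · rw [glcBisect, if_neg hlt]
      have : lo = hi := by omega
      subst this
      exact ⟨le_refl _, le_refl _, hbelow, fun h => habove lo (le_refl _) h⟩

-- ===== VERDICT (by name: the statement is the Claim_ definition above) =====
theorem get_length_code_spec : Claim_equal_get_length_code := by
  intro length _ hpre
  unfold Spec_get_length_code
  unfold Pre_get_length_code at hpre
  by_cases h258 : length = 258
  · simp [get_length_code, get_length_code_alt, h258]
  · -- r := result of the binary search, with its first-index properties
    obtain ⟨-, hr28, hbelow, hatr⟩ :=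
      glcBisect_first length 28 0 28 (by omega) (by omega) (by omega)
        (fun i h => absurd h (Nat.not_lt_zero i)) (fun i h1 h2 => absurd (lt_of_le_of_lt h1 h2) (lt_irrefl _))
    set r := glcBisect length 0 28 with hrdef
    -- r < 28 because length ≤ 32768 < threshold 27
    have h27 : length < glcThresholds.getD 27 0 := by
      show length < 32769; omega
    have hrlt : r < 28 := by
      rcases Nat.lt_or_ge r 28 with h | h
      · exact h
      · exact absurd h27 (not_lt_of_ge (hbelow 27 (by omega)))
    simp only [get_length_code, get_length_code_alt, if_neg h258]
    rw [glcLoop_eq lengthMap 257 length]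
    cases hf : lengthMap.findIdx? (fun q => decide (length < q.1 + 2 ^ q.2.toNat)) with
    | none =>
      -- impossible: entry 27 = (24577, 13) satisfies the condition
      rw [List.findIdx?_eq_none_iff] at hf
      have hmem : ((24577 : Int), (13 : Int)) ∈ lengthMap := by decide
      have hc := hf _ hmem
      simp only [decide_eq_false_iff_not] at hc
      exfalso
      apply hc
      show length < 24577 + 2 ^ (13 : Int).toNat
      have h2 : (2 : Int) ^ (13 : Int).toNat = 8192 := by decide
      rw [h2]; omega
    | some k =>
      rw [List.findIdx?_eq_some_iff_getElem] at hf
      obtain ⟨hk, hpk, hfirst⟩ := hf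
      have hk28 : k < 28 := hk
      -- translate the condition at an index j to the thresholds list
      have htrans : ∀ j (hj : j < 28),
          (decide (length < (lengthMap[j]'(hj)).1 + 2 ^ ((lengthMap[j]'(hj)).2).toNat) = true) ↔
          length < glcThresholds.getD j 0 := by
        intro j hj
        rw [decide_eq_true_eq, ← (glcMapFacts j hj).1, List.getD_eq_getElem _ _ hj]
      -- uniqueness of the first index: k = r
      have hkr : k = r := by
        rcases Nat.lt_trichotomy k r with h | h | h
        · exact absurd ((htrans k hk28).mp hpk) (not_lt_of_ge (hbelow k h))
        · exact h
        · exact absurd ((htrans r hrlt).mpr (hatr hrlt)) (by simpa using hfirst r h)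
      subst hkr
      rw [← hrdef, if_neg (Nat.ne_of_lt hrlt)]
      simp only [Prod.mk.injEq, true_and]
      exact (glcMapFacts r hk28).2
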